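-- pv_equiv track=rewrite | github.com/lvc0107/bash | python/codility_lesson/aabbb/ejer.py | solution
-- ===== SOURCE A (Python) =====
-- def solution(A, B):
--     if A == B:
--         return 'ab' * A
--
--     if A > B:
--         x = 'a'
--         y = 'b'
--         big = A
--         small = B
--     else:
--         x = 'b'
--         y = 'a'
--         big = B
--         small = A
--
--     res = ''
--     while big != small:
--         big -= 2
--         small -= 1
--         res += 2 * x + y
--     if big == small:
--         while big > 0:  # or small > 0
--             big -= 1
--             small -= 1
--             res += x + y
--     return res
-- ===== SOURCE B (Python) =====
-- def solution(A, B):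
--     if A == B:
--         return 'ab' * A
--     if A > B:
--         return 'aab' * (A - B) + 'ab' * max(0, 2 * B - A)
--     return 'bba' * (B - A) + 'ba' * max(0, 2 * A - B)
-- ===== Notes on version B (the rewrite author's own statement) =====
-- stated objective: faster
-- what changed: Replaces the two counter-decrementing while-loops (which build the result by repeated += concatenation) with a closed-form construction: |A-B| copies of the 'aab'/'bba' block followed by max(0, 2*min-max) copies of the 'ab'/'ba' block, built by string multiplication.
import Mathlib
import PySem

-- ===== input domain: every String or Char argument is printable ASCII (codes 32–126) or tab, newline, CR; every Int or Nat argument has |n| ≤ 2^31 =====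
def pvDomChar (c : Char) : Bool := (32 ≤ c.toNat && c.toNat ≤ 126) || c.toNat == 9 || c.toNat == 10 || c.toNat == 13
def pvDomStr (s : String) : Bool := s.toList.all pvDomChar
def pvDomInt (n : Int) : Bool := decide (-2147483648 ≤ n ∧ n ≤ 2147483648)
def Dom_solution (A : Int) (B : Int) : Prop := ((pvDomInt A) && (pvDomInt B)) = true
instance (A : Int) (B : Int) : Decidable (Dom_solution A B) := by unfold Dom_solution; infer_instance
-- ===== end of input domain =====

-- B replaces A's two counter-decrementing while-loops with a closed-form string construction (simpler).

-- Python s * n (empty for n ≤ 0); used by both ports for 'ab' * A etc.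
def repStr (s : String) : Nat → String
  | 0 => ""
  | n + 1 => s ++ repStr s n

def pyStrMul (s : String) (n : Int) : String := repStr s n.toNat

-- ===== PORT A =====
-- while big != small: big -= 2; small -= 1; res += 2*x + y
-- runs with fuel (big - small).toNat, which is exactly the iteration count when big ≥ small
def solLoop1 (x y : String) : Nat → Int → Int → String → Int × Int × String
  | 0, big, small, res => (big, small, res)
  | n + 1, big, small, res =>
    if big = small then (big, small, res)
    else solLoop1 x y n (big - 2) (small - 1) (res ++ (x ++ x ++ y))

-- while big > 0: big -= 1; small -= 1; res += x + y   (fuel big.toNat)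
def solLoop2 (x y : String) : Nat → Int → Int → String → String
  | 0, _, _, res => res
  | n + 1, big, small, res =>
    if big > 0 then solLoop2 x y n (big - 1) (small - 1) (res ++ (x ++ y))
    else res

def solution (A : Int) (B : Int) : String :=
  if A = B then pyStrMul "ab" A
  else
    let (x, y, big, small) : String × String × Int × Int :=
      if A > B then ("a", "b", A, B) else ("b", "a", B, A)
    let (big1, small1, res1) := solLoop1 x y (big - small).toNat big small ""
    if big1 = small1 then solLoop2 x y big1.toNat big1 small1 res1
    else res1

-- ===== PORT B =====
def solution_alt (A : Int) (B : Int) : String :=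
  if A = B then pyStrMul "ab" A
  else if A > B then pyStrMul "aab" (A - B) ++ pyStrMul "ab" (max 0 (2 * B - A))
  else pyStrMul "bba" (B - A) ++ pyStrMul "ba" (max 0 (2 * A - B))

-- ===== PRECONDITION & SPEC =====
def Spec_solution (A : Int) (B : Int) (out : String) : Prop := out = solution_alt A B
instance (A : Int) (B : Int) (out : String) : Decidable (Spec_solution A B out) := by unfold Spec_solution; infer_instance

-- ===== CLAIM (what is proved, stated in full; the proofs are below) =====
def Claim_equal_solution : Prop := ∀ (A : Int) (B : Int), Dom_solution A B → Spec_solution A B (solution A B)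

-- ===== LEMMAS AND PROOFS =====

theorem solLoop1_run (x y : String) (n : Nat) :
    ∀ (small : Int) (res : String),
      solLoop1 x y n (small + n) small res
        = (small - n, small - n, res ++ repStr (x ++ x ++ y) n) := by
  induction n with
  | zero => intro small res; simp [solLoop1, repStr]
  | succ n ih =>
    intro small res
    have hne : small + (n + 1 : Nat) ≠ small := by push_cast; omega
    have h2 : small + (n + 1 : Nat) - 2 = (small - 1) + n := by push_cast; omega
    rw [solLoop1, if_neg hne, h2, ih (small - 1) (res ++ (x ++ x ++ y))]
    simp only [Prod.mk.injEq, repStr]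
    refine ⟨by push_cast; omega, by push_cast; omega, by rw [String.append_assoc]⟩

theorem solLoop2_run (x y : String) (n : Nat) :
    ∀ (big small : Int) (res : String), big.toNat = n →
      solLoop2 x y n big small res = res ++ repStr (x ++ y) n := by
  induction n with
  | zero => intro big small res h; simp [solLoop2, repStr]
  | succ n ih =>
    intro big small res h
    have hpos : big > 0 := by omega
    rw [solLoop2, if_pos hpos, ih (big - 1) (small - 1) (res ++ (x ++ y)) (by omega)]
    simp only [repStr, String.append_assoc]

theorem solution_eq (A B : Int) : solution A B = solution_alt A B := by
  by_cases hAB : A = B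
  · simp [solution, solution_alt, hAB]
  · rcases lt_or_gt_of_ne hAB with hlt | hgt
    · -- A < B: branch x = "b", y = "a", big = B, small = A
      have hgtBA : ¬ A > B := by omega
      have hBA : B = A + ((B - A).toNat : Int) := by omega
      rw [solution, if_neg hAB, solution_alt, if_neg hAB]
      simp only [if_neg hgtBA]
      rw [show ((B : Int) - A).toNat = (B - A).toNat from rfl]
      conv_lhs => rw [hBA]
      rw [show (A + ((B - A).toNat : Int)) - A = ((B - A).toNat : Int) by omega]
      rw [Int.toNat_natCast, solLoop1_run]
      rw [solLoop2_run _ _ (A - ((B - A).toNat : Int)).toNat _ _ _ rfl]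
      have h1 : (A - ((B - A).toNat : Int)).toNat = (max 0 (2 * A - B)).toNat := by omega
      have h2 : ("b" ++ "b" ++ "a" : String) = "bba" := rfl
      have h3 : ("b" ++ "a" : String) = "ba" := rfl
      rw [h1, h2, h3, pyStrMul, pyStrMul]
      rw [show ((B : Int) - A).toNat = (B - A).toNat from rfl]
      simp
    · -- A > B
      have hBA : A = B + ((A - B).toNat : Int) := by omega
      rw [solution, if_neg hAB, solution_alt, if_neg hAB]
      simp only [if_pos hgt]
      conv_lhs => rw [hBA]
      rw [show (B + ((A - B).toNat : Int)) - B = ((A - B).toNat : Int) by omega]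
      rw [Int.toNat_natCast, solLoop1_run]
      rw [solLoop2_run _ _ (B - ((A - B).toNat : Int)).toNat _ _ _ rfl]
      have h1 : (B - ((A - B).toNat : Int)).toNat = (max 0 (2 * B - A)).toNat := by omega
      have h2 : ("a" ++ "a" ++ "b" : String) = "aab" := rfl
      have h3 : ("a" ++ "b" : String) = "ab" := rfl
      rw [h1, h2, h3, pyStrMul, pyStrMul]
      simp

-- ===== VERDICT (by name: the statement is the Claim_ definition above) =====
theorem solution_spec : Claim_equal_solution := by
  intro A B _
  unfold Spec_solution
  exact solution_eq A B
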